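-- pv_equiv track=rewrite | github.com/TheDaniel166/IsopGem | src/pillars/tq/services/number_properties.py | get_polygonal_info
-- ===== SOURCE A (Python) =====
-- import math
-- from typing import List, Dict, Tuple
--
-- def get_polygonal_info(n: int) -> List[str]:
--     """Check for polygonal numbers (3 to 12 sides)."""
--     if n < 1:
--         return []
--
--     results = []
--     # Formula for s-gonal number P(s,n) = ((s-2)n^2 - (s-4)n)/2
--     # Solving for n: n = ((s-4) + sqrt((s-4)^2 + 8x(s-2))) / (2(s-2))
--
--     polygons = {
--         3: "Triangle", 4: "Square", 5: "Pentagonal", 6: "Hexagonal",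
--         7: "Heptagonal", 8: "Octagonal", 9: "Nonagonal", 10: "Decagonal",
--         11: "Hendecagonal", 12: "Dodecagonal"
--     }
--
--     for s, name in polygons.items():
--         # Calculate discriminant part: (s-4)^2 + 8n(s-2)
--         discriminant = (s - 4)**2 + 8 * n * (s - 2)
--         sqrt_disc = int(math.isqrt(discriminant))
--
--         if sqrt_disc * sqrt_disc == discriminant:
--             numerator = (s - 4) + sqrt_disc
--             denominator = 2 * (s - 2)
--
--             if numerator % denominator == 0:
--                 index = numerator // denominator
--                 results.append(f"{name} (Index: {index})")
--
--     return results
-- ===== SOURCE B (Python) =====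
-- def get_polygonal_info(n: int):
--     """Check for polygonal numbers (3 to 12 sides) by forward generation
--     of each polygonal sequence instead of the closed-form inverse."""
--     if n < 1:
--         return []
--
--     polygons = {
--         3: "Triangle", 4: "Square", 5: "Pentagonal", 6: "Hexagonal",
--         7: "Heptagonal", 8: "Octagonal", 9: "Nonagonal", 10: "Decagonal",
--         11: "Hendecagonal", 12: "Dodecagonal"
--     }
--
--     results = []
--     for s, name in polygons.items():
--         k = 1
--         while True:
--             value = ((s - 2) * k * k - (s - 4) * k) // 2
--             if value >= n:
--                 if value == n:
--                     results.append(f"{name} (Index: {k})")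
--                 break
--             k += 1
--     return results
-- ===== Notes on version B (the rewrite author's own statement) =====
-- stated objective: alternative
-- what changed: Replaces A's closed-form inverse (discriminant, isqrt perfect-square test and divisibility check) by forward generation of each polygonal sequence from the first index upward until the value reaches or passes n.
import Mathlib
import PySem

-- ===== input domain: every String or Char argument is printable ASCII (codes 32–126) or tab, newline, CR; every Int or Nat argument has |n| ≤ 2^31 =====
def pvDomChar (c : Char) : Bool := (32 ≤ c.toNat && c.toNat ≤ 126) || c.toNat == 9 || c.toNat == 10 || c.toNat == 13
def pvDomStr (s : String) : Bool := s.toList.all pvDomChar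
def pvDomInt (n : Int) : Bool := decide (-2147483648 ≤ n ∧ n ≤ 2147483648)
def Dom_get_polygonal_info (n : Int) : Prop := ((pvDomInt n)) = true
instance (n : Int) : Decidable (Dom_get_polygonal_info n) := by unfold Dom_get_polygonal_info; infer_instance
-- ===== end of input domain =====

-- B replaces A's closed-form inverse (isqrt + divisibility test) by forward generation of each
-- polygonal sequence until it reaches or passes n; objective: alternative (not faster).

-- ===== PORT A =====
-- the dict literal 'polygons' of A, in insertion order
def pvPolygonsA : List (Int × String) :=
  [(3, "Triangle"), (4, "Square"), (5, "Pentagonal"), (6, "Hexagonal"),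
   (7, "Heptagonal"), (8, "Octagonal"), (9, "Nonagonal"), (10, "Decagonal"),
   (11, "Hendecagonal"), (12, "Dodecagonal")]

-- body of A's for-loop over (s, name)
def pvStepA (n : Int) (results : List String) (p : Int × String) : List String :=
  let s := p.1
  let disc := (s - 4) ^ 2 + 8 * n * (s - 2)
  -- int(math.isqrt(disc)) ported by hand as Nat.sqrt; exact since disc ≥ 0 on every reached input (n ≥ 1, s ≥ 3)
  let sqrt_disc : Int := Int.ofNat (Nat.sqrt disc.toNat)
  if sqrt_disc * sqrt_disc = disc then
    let numerator := (s - 4) + sqrt_disc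
    let denominator := 2 * (s - 2)
    if PySem.Int.mod numerator denominator = 0 then
      results ++ [p.2 ++ " (Index: " ++ PySem.Int.toStr (PySem.Int.floordiv numerator denominator) ++ ")"]
    else results
  else results

def get_polygonal_info (n : Int) : List String :=
  if n < 1 then []
  else pvPolygonsA.foldl (pvStepA n) []

-- ===== PORT B =====
-- the dict literal 'polygons' of B, in insertion order
def pvPolygonsB : List (Int × String) :=
  [(3, "Triangle"), (4, "Square"), (5, "Pentagonal"), (6, "Hexagonal"),
   (7, "Heptagonal"), (8, "Octagonal"), (9, "Nonagonal"), (10, "Decagonal"),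
   (11, "Hendecagonal"), (12, "Dodecagonal")]

-- B's 'while True' loop: k = 1, 2, 3, … until value ≥ n; fuel only makes it total
-- (for n ≥ 1 the loop stops at some k ≤ n, so fuel n.toNat is never exhausted)
def pvFindB (s n : Int) : Int → Nat → Option Int
  | _, 0 => none
  | k, fuel + 1 =>
    let value := PySem.Int.floordiv ((s - 2) * k * k - (s - 4) * k) 2
    if n ≤ value then (if value = n then some k else none)
    else pvFindB s n (k + 1) fuel

-- body of B's for-loop over (s, name)
def pvStepB (n : Int) (results : List String) (p : Int × String) : List String :=
  match pvFindB p.1 n 1 n.toNat with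
  | some k => results ++ [p.2 ++ " (Index: " ++ PySem.Int.toStr k ++ ")"]
  | none => results

def get_polygonal_info_alt (n : Int) : List String :=
  if n < 1 then []
  else pvPolygonsB.foldl (pvStepB n) []

-- ===== PRECONDITION & SPEC =====
def Spec_get_polygonal_info (n : Int) (out : List String) : Prop := out = get_polygonal_info_alt n
instance (n : Int) (out : List String) : Decidable (Spec_get_polygonal_info n out) := by unfold Spec_get_polygonal_info; infer_instance

-- ===== CLAIM (what is proved, stated in full; the proofs are below) =====
def Claim_equal_get_polygonal_info : Prop := ∀ (n : Int), Dom_get_polygonal_info n → Spec_get_polygonal_info n (get_polygonal_info n)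

-- ===== LEMMAS AND PROOFS =====

-- the doubled s-gonal value: pvE s k = 2 * P(s,k)
def pvE (s k : Int) : Int := (s - 2) * k * k - (s - 4) * k

lemma pvE_even (s k : Int) : ∃ t, pvE s k = 2 * t := by
  obtain ⟨m, hm | hm⟩ := Int.even_or_odd' k
  · exact ⟨2 * (s - 2) * m * m - (s - 4) * m, by subst hm; unfold pvE; ring⟩
  · exact ⟨2 * (s - 2) * m * m + s * m + 1, by subst hm; unfold pvE; ring⟩

lemma pvVal_half (t : Int) : PySem.Int.floordiv (2 * t) 2 = t := by
  rw [PySem.Int.floordiv_eq_ediv_of_pos (by norm_num)]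
  omega

lemma pvVal_le (s k n : Int) :
    (n ≤ PySem.Int.floordiv ((s - 2) * k * k - (s - 4) * k) 2) ↔ 2 * n ≤ pvE s k := by
  obtain ⟨t, ht⟩ := pvE_even s k
  unfold pvE at ht ⊢
  rw [ht, pvVal_half]
  omega

lemma pvVal_eq (s k n : Int) :
    (PySem.Int.floordiv ((s - 2) * k * k - (s - 4) * k) 2 = n) ↔ pvE s k = 2 * n := by
  obtain ⟨t, ht⟩ := pvE_even s k
  unfold pvE at ht ⊢
  rw [ht, pvVal_half]
  omega

lemma pvE_strictMono {s a b : Int} (hs : 3 ≤ s) (ha : 1 ≤ a) (hab : a < b) :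
    pvE s a < pvE s b := by
  unfold pvE
  nlinarith [mul_pos (sub_pos.mpr hab) (by nlinarith : (0:Int) < (s - 2) * (a + b) - (s - 4))]

-- soundness of B's loop
lemma pvFindB_some {s n : Int} {k0 : Int} {fuel : Nat} {k : Int}
    (h : pvFindB s n k0 fuel = some k) : k0 ≤ k ∧ pvE s k = 2 * n := by
  induction fuel generalizing k0 with
  | zero => simp [pvFindB] at h
  | succ m ih =>
    simp only [pvFindB] at h
    split_ifs at h with h1 h2
    · have hkk : k0 = k := Option.some.inj h
      exact ⟨le_of_eq hkk, hkk ▸ (pvVal_eq s k0 n).mp h2⟩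
    · obtain ⟨h3, h4⟩ := ih h
      exact ⟨by omega, h4⟩

-- completeness of B's loop
lemma pvFindB_complete {s n K : Int} (hs : 3 ≤ s) (hK : 1 ≤ K) (hE : pvE s K = 2 * n) :
    ∀ (fuel : Nat) (k0 : Int), 1 ≤ k0 → k0 ≤ K → (K - k0).toNat < fuel →
    pvFindB s n k0 fuel = some K := by
  intro fuel
  induction fuel with
  | zero => intro k0 _ _ h; omega
  | succ m ih =>
    intro k0 h1 h2 h3
    unfold pvFindB
    simp only
    rcases eq_or_lt_of_le h2 with heq | hlt
    · subst heq
      rw [if_pos ((pvVal_le s k0 n).mpr (le_of_eq hE.symm)),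
          if_pos ((pvVal_eq s k0 n).mpr hE)]
    · have hv : ¬ (n ≤ PySem.Int.floordiv ((s - 2) * k0 * k0 - (s - 4) * k0) 2) := by
        rw [pvVal_le]
        have := pvE_strictMono hs h1 hlt
        omega
      rw [if_neg hv]
      exact ih (k0 + 1) (by omega) (by omega) (by omega)

-- a witness K is bounded by n, so fuel n.toNat suffices
lemma pvK_le_n {s n K : Int} (hs : 3 ≤ s) (hK : 1 ≤ K) (hE : pvE s K = 2 * n) : K ≤ n := by
  unfold pvE at hE
  have h1 : (0:Int) ≤ (s - 2) * K * (K - 1) :=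
    mul_nonneg (mul_nonneg (by omega) (by omega)) (by omega)
  nlinarith [h1]

-- A's condition, forward direction: the tests succeed → k := numerator // denominator is a witness
lemma pvA_forward {s n r : Int} (hs : 3 ≤ s) (hn : 1 ≤ n) (hr0 : 0 ≤ r)
    (hsq : r * r = (s - 4) ^ 2 + 8 * n * (s - 2))
    (hmod : PySem.Int.mod ((s - 4) + r) (2 * (s - 2)) = 0) :
    1 ≤ PySem.Int.floordiv ((s - 4) + r) (2 * (s - 2)) ∧
      pvE s (PySem.Int.floordiv ((s - 4) + r) (2 * (s - 2))) = 2 * n := by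
  set k := PySem.Int.floordiv ((s - 4) + r) (2 * (s - 2)) with hk
  have hnum : (s - 4) + r = k * (2 * (s - 2)) := by
    have h := PySem.Int.floordiv_mul_add_mod ((s - 4) + r) (2 * (s - 2))
    rw [hmod] at h
    rw [← hk] at h
    linarith
  have hrk : r = 2 * (s - 2) * k - (s - 4) := by
    have h2 : k * (2 * (s - 2)) = 2 * (s - 2) * k := by ring
    linarith [hnum, h2]
  have hE : pvE s k = 2 * n := by
    have h4 : 4 * (s - 2) * (pvE s k) = 4 * (s - 2) * (2 * n) := by
      unfold pvE
      nlinarith [hsq, hrk]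
    exact mul_left_cancel₀ (by intro h; omega : (4 * (s - 2) : Int) ≠ 0) h4
  refine ⟨?_, hE⟩
  -- k ≥ 1: from r ≥ 0 we get k ≥ 0, and k = 0 would give pvE s 0 = 0 ≠ 2n
  have hk0 : 0 ≤ k := by
    by_contra hneg
    rw [not_le] at hneg
    nlinarith [hrk, hr0, mul_nonneg (show (0:Int) ≤ 2 * (s - 2) by omega)
      (show (0:Int) ≤ -1 - k by omega)]
  rcases eq_or_lt_of_le hk0 with h | h
  · exfalso
    have h0 : pvE s 0 = 2 * n := by rw [h]; exact hE
    unfold pvE at h0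
    omega
  · omega

-- A's condition, reverse direction: a witness K makes both tests succeed with index K
lemma pvA_reverse {s n K : Int} (hs : 3 ≤ s) (hK : 1 ≤ K) (hE : pvE s K = 2 * n) :
    (Int.ofNat (Nat.sqrt ((s - 4) ^ 2 + 8 * n * (s - 2)).toNat)) *
      (Int.ofNat (Nat.sqrt ((s - 4) ^ 2 + 8 * n * (s - 2)).toNat)) = (s - 4) ^ 2 + 8 * n * (s - 2) ∧
    PySem.Int.mod ((s - 4) + Int.ofNat (Nat.sqrt ((s - 4) ^ 2 + 8 * n * (s - 2)).toNat)) (2 * (s - 2)) = 0 ∧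
    PySem.Int.floordiv ((s - 4) + Int.ofNat (Nat.sqrt ((s - 4) ^ 2 + 8 * n * (s - 2)).toNat)) (2 * (s - 2)) = K := by
  set D : Int := (s - 4) ^ 2 + 8 * n * (s - 2) with hD
  set r0 : Int := 2 * (s - 2) * K - (s - 4) with hr0def
  have hr0pos : 0 < r0 := by
    nlinarith [mul_le_mul_of_nonneg_left hK (show (0:Int) ≤ 2 * (s - 2) by omega)]
  have hsq : r0 * r0 = D := by
    unfold pvE at hE
    nlinarith
  have hcastr : ((r0.toNat : Int)) = r0 := Int.toNat_of_nonneg hr0pos.le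
  have hDt : D.toNat = r0.toNat ^ 2 := by
    have h2 : ((r0.toNat ^ 2 : Nat) : Int) = D := by
      push_cast
      rw [hcastr]
      nlinarith [hsq]
    omega
  have hsqrt : Nat.sqrt D.toNat = r0.toNat := by
    rw [hDt]
    exact Nat.sqrt_eq' r0.toNat
  have hcast : (Int.ofNat (Nat.sqrt D.toNat)) = r0 := by
    rw [hsqrt]
    exact_mod_cast hcastr
  rw [hcast]
  have hden : (0:Int) < 2 * (s - 2) := by omega
  have hnum : (s - 4) + r0 = K * (2 * (s - 2)) := by rw [hr0def]; ring
  refine ⟨hsq, ?_, ?_⟩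
  · rw [PySem.Int.mod_eq_emod_of_pos hden, hnum]
    exact Int.mul_emod_left K (2 * (s - 2))
  · rw [PySem.Int.floordiv_eq_ediv_of_pos hden, hnum]
    exact Int.mul_ediv_cancel K (ne_of_gt hden)

-- the two loop bodies agree on every polygon entry
lemma pvStep_eq {n : Int} (hn : 1 ≤ n) {s : Int} (hs : 3 ≤ s) (name : String)
    (results : List String) :
    pvStepA n results (s, name) = pvStepB n results (s, name) := by
  unfold pvStepA pvStepB
  simp only
  by_cases hW : ∃ K, 1 ≤ K ∧ pvE s K = 2 * n
  · obtain ⟨K, hK1, hKE⟩ := hW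
    obtain ⟨hsq, hmod, hdiv⟩ := pvA_reverse hs hK1 hKE
    have hfind : pvFindB s n 1 n.toNat = some K :=
      pvFindB_complete hs hK1 hKE n.toNat 1 (le_refl _) hK1
        (by have := pvK_le_n hs hK1 hKE; omega)
    rw [if_pos hsq, if_pos hmod, hdiv, hfind]
  · have hfind : pvFindB s n 1 n.toNat = none := by
      cases h : pvFindB s n 1 n.toNat with
      | none => rfl
      | some k =>
        exact absurd ⟨k, (pvFindB_some h).1, (pvFindB_some h).2⟩ hW
    rw [hfind]
    split_ifs with h1 h2
    · exfalso
      have hfwd := pvA_forward hs hn (Int.natCast_nonneg _) h1 h2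
      exact hW ⟨_, hfwd.1, hfwd.2⟩
    · rfl
    · rfl

-- ===== VERDICT (by name: the statement is the Claim_ definition above) =====
theorem get_polygonal_info_spec : Claim_equal_get_polygonal_info := by
  intro n _
  unfold Spec_get_polygonal_info get_polygonal_info get_polygonal_info_alt
  by_cases h : n < 1
  · rw [if_pos h, if_pos h]
  · rw [if_neg h, if_neg h]
    have hn : 1 ≤ n := by omega
    have hPB : pvPolygonsB = pvPolygonsA := by rfl
    rw [hPB]
    apply PySem.List.foldl_congr_mem
    intro acc p hp
    fin_cases hp <;> exact pvStep_eq hn (by norm_num) _ _
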